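-- pv_equiv track=rewrite | github.com/M507/Quick-and-Dirty-Recon | HiddenGems/main.py | remove_unwanted_urls
-- ===== SOURCE A (Python) =====
-- def remove_unwanted_urls(LIST_OF_URLs,BLOCK_LIST):
--     tmp_list = []
--     for url_tmp in LIST_OF_URLs:
--         good_to_go = 1
--         for bad_word in BLOCK_LIST:
--             if bad_word in url_tmp:
--                 good_to_go = 0
--         if good_to_go:
--             tmp_list.append(url_tmp)
--     return tmp_list
-- ===== SOURCE B (Python) =====
-- def remove_unwanted_urls(LIST_OF_URLs, BLOCK_LIST):
--     survivors = list(LIST_OF_URLs)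
--     for bad_word in BLOCK_LIST:
--         survivors = [url for url in survivors if bad_word not in url]
--     return survivors
-- ===== Notes on version B (the rewrite author's own statement) =====
-- stated objective: faster
-- what changed: Inverted loop nesting: instead of scanning every blocklist word per URL with a flag variable, B folds over the blocklist, filtering the surviving URL list once per word, so URLs already removed are never scanned again.
import Mathlib
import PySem

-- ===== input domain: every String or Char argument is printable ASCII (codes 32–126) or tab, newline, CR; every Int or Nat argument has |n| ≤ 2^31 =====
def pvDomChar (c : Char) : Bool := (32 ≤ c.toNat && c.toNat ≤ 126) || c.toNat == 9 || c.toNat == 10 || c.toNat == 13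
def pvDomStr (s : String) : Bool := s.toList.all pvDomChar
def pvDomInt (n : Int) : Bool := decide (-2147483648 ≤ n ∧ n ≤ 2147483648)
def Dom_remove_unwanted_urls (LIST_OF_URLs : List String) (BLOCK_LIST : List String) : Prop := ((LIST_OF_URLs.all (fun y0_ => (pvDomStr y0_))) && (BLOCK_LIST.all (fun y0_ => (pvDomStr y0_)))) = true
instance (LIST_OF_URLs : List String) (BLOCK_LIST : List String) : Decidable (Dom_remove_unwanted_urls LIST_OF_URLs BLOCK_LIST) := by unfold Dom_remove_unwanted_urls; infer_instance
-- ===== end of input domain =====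

-- B inverts the loop nesting: it folds over the blocklist, filtering the surviving URL list
-- once per blocked word, instead of scanning every blocked word per URL with a flag (objective: alternative).


-- ===== PORT A =====
def remove_unwanted_urls (LIST_OF_URLs : List String) (BLOCK_LIST : List String) : List String :=
  LIST_OF_URLs.foldl (fun tmp_list url_tmp =>
    let good_to_go : Int :=
      BLOCK_LIST.foldl (fun g bad_word => if PySem.Str.isIn bad_word url_tmp then 0 else g) 1
    if good_to_go ≠ 0 then tmp_list ++ [url_tmp] else tmp_list) []

-- ===== PORT B =====
def remove_unwanted_urls_alt (LIST_OF_URLs : List String) (BLOCK_LIST : List String) : List String :=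
  BLOCK_LIST.foldl (fun survivors bad_word =>
    survivors.filter (fun url => ! PySem.Str.isIn bad_word url)) LIST_OF_URLs

-- ===== PRECONDITION & SPEC =====
def Spec_remove_unwanted_urls (LIST_OF_URLs : List String) (BLOCK_LIST : List String) (out : List String) : Prop := out = remove_unwanted_urls_alt LIST_OF_URLs BLOCK_LIST
instance (LIST_OF_URLs : List String) (BLOCK_LIST : List String) (out : List String) : Decidable (Spec_remove_unwanted_urls LIST_OF_URLs BLOCK_LIST out) := by unfold Spec_remove_unwanted_urls; infer_instance

-- ===== CLAIM (what is proved, stated in full; the proofs are below) =====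
def Claim_equal_remove_unwanted_urls : Prop := ∀ (LIST_OF_URLs : List String) (BLOCK_LIST : List String), Dom_remove_unwanted_urls LIST_OF_URLs BLOCK_LIST → Spec_remove_unwanted_urls LIST_OF_URLs BLOCK_LIST (remove_unwanted_urls LIST_OF_URLs BLOCK_LIST)

-- ===== LEMMAS AND PROOFS =====

-- A's inner flag loop: starting from g, the fold returns 0 if some blocked word occurs, else g.
theorem good_to_go_eq (bl : List String) (u : String) (g : Int) :
    bl.foldl (fun g bad_word => if PySem.Str.isIn bad_word u then 0 else g) g
      = if bl.any (fun b => PySem.Str.isIn b u) then 0 else g := by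
  induction bl generalizing g with
  | nil => simp
  | cons b t ih =>
    simp only [List.foldl_cons, List.any_cons, ih, Bool.or_eq_true]
    split_ifs <;> tauto

-- A's result is the one-pass filter by "no blocked word occurs".
theorem portA_eq_filter (urls bl : List String) :
    remove_unwanted_urls urls bl
      = urls.filter (fun u => ! bl.any (fun b => PySem.Str.isIn b u)) := by
  unfold remove_unwanted_urls
  have hc := PySem.List.foldl_congr_mem (l := urls) (init := ([] : List String))
    (f := fun tmp_list url_tmp =>
      let good_to_go : Int :=
        bl.foldl (fun g bad_word => if PySem.Str.isIn bad_word url_tmp then 0 else g) 1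
      if good_to_go ≠ 0 then tmp_list ++ [url_tmp] else tmp_list)
    (g := fun acc u => if (! bl.any (fun b => PySem.Str.isIn b u)) = true then acc ++ [u] else acc)
    (by intro acc u _
        simp only [good_to_go_eq]
        cases h : bl.any (fun b => PySem.Str.isIn b u) <;> simp)
  rw [hc, PySem.List.foldl_append_if_eq_filter]
  simp

-- B's fold of per-word filters is the same one-pass filter.
theorem portB_eq_filter (urls bl : List String) :
    remove_unwanted_urls_alt urls bl
      = urls.filter (fun u => ! bl.any (fun b => PySem.Str.isIn b u)) := by
  unfold remove_unwanted_urls_alt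
  induction bl generalizing urls with
  | nil => simp
  | cons b t ih =>
    simp only [List.foldl_cons, ih, List.filter_filter, List.any_cons]
    congr 1
    funext u
    rw [Bool.not_or, Bool.and_comm]

-- ===== VERDICT (by name: the statement is the Claim_ definition above) =====
theorem remove_unwanted_urls_spec : Claim_equal_remove_unwanted_urls := by
  intro urls bl _
  unfold Spec_remove_unwanted_urls
  rw [portA_eq_filter, portB_eq_filter]
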